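-- pv_equiv track=rewrite | github.com/fan1dy/DataMarkets | RAG_reranking_with_cost_llm_utility.py | loo_payments
-- ===== SOURCE A (Python) =====
-- from typing import Dict
--
-- def loo_payments(prices, scores, doc_ids):
--     """
--     LOO payment is the difference in valuations when seller j is removed from the market.
--     """
--     utility =  [scores[i] - prices[i] for i in range(len(prices))]
--     idx = utility.index(max(utility))
--     v_full = scores[idx]
--     payments: Dict[int, float] = {}
--     for id in range(len(doc_ids)):
--         prices_tmp = prices.copy()
--         scores_tmp = scores.copy()
--         prices_tmp.pop(id)
--         scores_tmp.pop(id)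
--         # rebuild tiny index w/o doc_j
--         utility_minus_j = [-prices_tmp[i] + scores_tmp[i] for i in range(len(prices_tmp))]
--         id_ = utility_minus_j.index(max(utility_minus_j))
--         payments[int(doc_ids[id])] = v_full - scores_tmp[id_]
--     return payments
-- ===== SOURCE B (Python) =====
-- def loo_payments(prices, scores, doc_ids):
--     # One pass: removing any non-best seller leaves the best utility (and its score)
--     # unchanged, so its payment is 0; only removing the best seller changes the
--     # valuation, by the gap to the runner-up score.
--     util = [s - p for s, p in zip(scores, prices)]
--     best = max(range(len(util)), key=lambda i: util[i])
--     rest = [i for i in range(len(util)) if i != best]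
--     v_full = scores[best]
--     gap = v_full - scores[max(rest, key=lambda i: util[i])] if rest else 0
--     return {int(doc_ids[j]): (gap if j == best else 0) for j in range(len(doc_ids))}
-- ===== Notes on version B (the rewrite author's own statement) =====
-- stated objective: faster
-- what changed: Instead of rebuilding and re-scanning the market once per document (quadratic), B computes the global first-argmax of utility and the runner-up once and emits each payment in O(1): removing a non-best document leaves the best score in place (payment 0), removing the best pays the gap to the runner-up score.
import Mathlib
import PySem

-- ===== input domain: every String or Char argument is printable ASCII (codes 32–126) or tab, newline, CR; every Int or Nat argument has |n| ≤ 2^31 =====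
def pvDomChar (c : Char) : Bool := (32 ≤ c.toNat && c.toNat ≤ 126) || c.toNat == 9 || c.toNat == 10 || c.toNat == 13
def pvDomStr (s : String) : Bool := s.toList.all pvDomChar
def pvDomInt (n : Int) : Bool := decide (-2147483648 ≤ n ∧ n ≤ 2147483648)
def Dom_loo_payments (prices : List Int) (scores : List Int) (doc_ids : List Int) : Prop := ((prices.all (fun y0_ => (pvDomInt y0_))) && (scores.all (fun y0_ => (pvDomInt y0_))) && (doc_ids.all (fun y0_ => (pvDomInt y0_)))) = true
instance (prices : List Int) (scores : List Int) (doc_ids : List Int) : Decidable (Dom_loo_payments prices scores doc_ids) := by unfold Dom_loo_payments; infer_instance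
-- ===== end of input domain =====

-- B replaces A's per-document rebuild-and-rescan (quadratic) by one global first-argmax
-- and one runner-up computed once: payment is 0 except for the best document.

-- ===== PORT A =====
def loo_payments (prices : List Int) (scores : List Int) (doc_ids : List Int) : List (Int × Int) :=
  let utility := (PySem.List.pyRange 0 (prices.length : Int) 1).map
      (fun i => PySem.List.pyGetD scores i 0 - PySem.List.pyGetD prices i 0)
  match PySem.List.max? utility (fun x => x) with
  | none => []  -- max([]) raises ValueError; excluded by Pre_
  | some m =>
    match PySem.List.index? utility m with
    | none => []  -- unreachable: m ∈ utility
    | some idx =>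
      let v_full := PySem.List.pyGetD scores (idx : Int) 0
      let payments : PySem.Dict Int Int :=
        (PySem.List.pyRange 0 (doc_ids.length : Int) 1).foldl (fun pay id =>
          match PySem.List.pop? prices id, PySem.List.pop? scores id with
          | some (_, prices_tmp), some (_, scores_tmp) =>
            let utility_minus_j := (PySem.List.pyRange 0 (prices_tmp.length : Int) 1).map
                (fun i => -(PySem.List.pyGetD prices_tmp i 0) + PySem.List.pyGetD scores_tmp i 0)
            (match PySem.List.max? utility_minus_j (fun x => x) with
            | none => pay  -- max([]) raises ValueError; excluded by Pre_
            | some m2 =>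
              match PySem.List.index? utility_minus_j m2 with
              | none => pay  -- unreachable: m2 ∈ utility_minus_j
              | some id_ => pay.insert (PySem.List.pyGetD doc_ids id 0)
                  (v_full - PySem.List.pyGetD scores_tmp (id_ : Int) 0))
          | _, _ => pay  -- pop out of range raises IndexError; excluded by Pre_
          ) PySem.Dict.empty
      payments.items

-- ===== PORT B =====
def loo_payments_alt (prices : List Int) (scores : List Int) (doc_ids : List Int) : List (Int × Int) :=
  let util := (scores.zip prices).map (fun sp => sp.1 - sp.2)
  match PySem.List.max? (PySem.List.pyRange 0 (util.length : Int) 1)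
      (fun i => PySem.List.pyGetD util i 0) with
  | none => []  -- max over an empty range raises ValueError; excluded by Pre_
  | some best =>
    let rest := (PySem.List.pyRange 0 (util.length : Int) 1).filter (fun i => i != best)
    let v_full := PySem.List.pyGetD scores best 0
    let gap :=
      if rest = [] then 0 else
        match PySem.List.max? rest (fun i => PySem.List.pyGetD util i 0) with
        | none => 0  -- unreachable: rest ≠ []
        | some s => v_full - PySem.List.pyGetD scores s 0
    ((PySem.List.pyRange 0 (doc_ids.length : Int) 1).foldl
        (fun pay j => pay.insert (PySem.List.pyGetD doc_ids j 0) (if j = best then gap else 0))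
        PySem.Dict.empty).items

-- ===== PRECONDITION & SPEC =====
-- Exactly the inputs on which A returns: a nonempty price list, scores at least as long
-- (the comprehension indexes scores up to len(prices)), no more doc_ids than prices
-- (pop(id) would raise IndexError), and at least 2 documents whenever the loop runs
-- (max of the emptied market would raise ValueError).
def Pre_loo_payments (prices : List Int) (scores : List Int) (doc_ids : List Int) : Prop :=
  1 ≤ prices.length ∧ prices.length ≤ scores.length ∧ doc_ids.length ≤ prices.length ∧
    (doc_ids ≠ [] → 2 ≤ prices.length)
instance (prices : List Int) (scores : List Int) (doc_ids : List Int) : Decidable (Pre_loo_payments prices scores doc_ids) := by unfold Pre_loo_payments; infer_instance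

def pvWitness_loo_payments : List Int × List Int × List Int := ([1, 2], [3, 5], [10, 20])

def Spec_loo_payments (prices : List Int) (scores : List Int) (doc_ids : List Int) (out : List (Int × Int)) : Prop := out = loo_payments_alt prices scores doc_ids
instance (prices : List Int) (scores : List Int) (doc_ids : List Int) (out : List (Int × Int)) : Decidable (Spec_loo_payments prices scores doc_ids out) := by unfold Spec_loo_payments; infer_instance

-- ===== CLAIM (what is proved, stated in full; the proofs are below) =====
def Claim_equal_loo_payments : Prop := ∀ (prices : List Int) (scores : List Int) (doc_ids : List Int), Dom_loo_payments prices scores doc_ids → Pre_loo_payments prices scores doc_ids → Spec_loo_payments prices scores doc_ids (loo_payments prices scores doc_ids)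

-- ===== LEMMAS AND PROOFS =====

-- the common utility list both programs compute
def pvU (prices scores : List Int) : List Int :=
  (List.range prices.length).map (fun k => scores.getD k 0 - prices.getD k 0)

-- "j is the first argmax of u among indices satisfying P"
def pvFAX (u : List Int) (P : Nat → Prop) (j : Nat) : Prop :=
  j < u.length ∧ P j ∧ (∀ k, k < u.length → P k → u.getD k 0 ≤ u.getD j 0) ∧
    (∀ k, k < j → P k → u.getD k 0 < u.getD j 0)

theorem pvFAX_unique {u : List Int} {P : Nat → Prop} {j j' : Nat}
    (h : pvFAX u P j) (h' : pvFAX u P j') : j = j' := by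
  obtain ⟨hj, hPj, hmax, hstr⟩ := h
  obtain ⟨hj', hPj', hmax', hstr'⟩ := h'
  rcases Nat.lt_trichotomy j j' with hlt | heq | hlt
  · have := hstr' j hlt hPj
    have := hmax j' hj' hPj'
    omega
  · exact heq
  · have := hstr j' hlt hPj'
    have := hmax' j hj hPj
    omega

-- running maximum keeping the earlier element on ties (Python max's tie rule)
def pvMaxFold {α : Type} (key : α → Int) (a : α) (t : List α) : α :=
  t.foldl (fun m x => if key m < key x then x else m) a

theorem pvMaxFold_cons {α : Type} (key : α → Int) (a x : α) (t : List α) :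
    pvMaxFold key a (x :: t) = pvMaxFold key (if key a < key x then x else a) t := rfl

theorem pvMax?_cons {α : Type} (key : α → Int) (x : α) (t : List α) :
    PySem.List.max? (x :: t) key = some (pvMaxFold key x t) := by
  have aux : ∀ (t : List α) (a : α),
      List.foldl (fun acc y => match acc with
        | none => some y
        | some m => if key m < key y then some y else some m) (some a) t
        = some (pvMaxFold key a t) := by
    intro t
    induction t with
    | nil => intro a; rfl
    | cons y t ih =>
      intro a
      simp only [List.foldl_cons]
      rw [pvMaxFold_cons]
      by_cases h : key a < key y
      · simp only [if_pos h]; exact ih y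
      · simp only [if_neg h]; exact ih a
  unfold PySem.List.max?
  simp only [List.foldl_cons]
  exact aux t x

theorem pvMaxFold_stay {α : Type} (key : α → Int) :
    ∀ (t : List α) (a : α), (∀ y ∈ t, key y ≤ key a) → pvMaxFold key a t = a := by
  intro t
  induction t with
  | nil => intro a _; rfl
  | cons y t ih =>
    intro a h
    rw [pvMaxFold_cons, if_neg (not_lt.mpr (h y List.mem_cons_self))]
    exact ih a (fun z hz => h z (List.mem_cons_of_mem _ hz))

theorem pvMaxFold_high {α : Type} (key : α → Int) (m : α) :
    ∀ (pre : List α) (a : α) (suf : List α), key a < key m → (∀ y ∈ pre, key y < key m) →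
      (∀ y ∈ suf, key y ≤ key m) → pvMaxFold key a (pre ++ m :: suf) = m := by
  intro pre
  induction pre with
  | nil =>
    intro a suf ha hsuf hle
    rw [List.nil_append, pvMaxFold_cons, if_pos ha]
    exact pvMaxFold_stay key suf m hle
  | cons p pre ih =>
    intro a suf ha hpre hsuf
    rw [List.cons_append, pvMaxFold_cons]
    have hp : key p < key m := hpre p List.mem_cons_self
    by_cases h : key a < key p
    · rw [if_pos h]
      exact ih p suf hp (fun y hy => hpre y (List.mem_cons_of_mem _ hy)) hsuf
    · rw [if_neg h]
      exact ih a suf ha (fun y hy => hpre y (List.mem_cons_of_mem _ hy)) hsuf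

theorem pvMax?_of_decomp {α : Type} (key : α → Int) (pre : List α) (m : α) (suf : List α)
    (hpre : ∀ y ∈ pre, key y < key m) (hsuf : ∀ y ∈ suf, key y ≤ key m) :
    PySem.List.max? (pre ++ m :: suf) key = some m := by
  cases pre with
  | nil =>
    rw [List.nil_append, pvMax?_cons, pvMaxFold_stay key suf m hsuf]
  | cons p pre' =>
    rw [List.cons_append, pvMax?_cons]
    congr 1
    exact pvMaxFold_high key m pre' p suf (hpre p List.mem_cons_self)
      (fun y hy => hpre y (List.mem_cons_of_mem _ hy)) hsuf

theorem pvGetD_erase {α : Type} (xs : List α) (t j : Nat) (d : α)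
    (h : j < (xs.eraseIdx t).length) :
    (xs.eraseIdx t).getD j d = xs.getD (if j < t then j else j + 1) d := by
  have hlen := List.length_eraseIdx (l := xs) (i := t)
  by_cases htl : t < xs.length
  · rw [if_pos htl] at hlen
    rw [List.getD_eq_getElem _ _ h, List.getElem_eraseIdx]
    by_cases hc : j < t
    · rw [dif_pos hc, if_pos hc, List.getD_eq_getElem _ _ (by omega : j < xs.length)]
    · rw [dif_neg hc, if_neg hc, List.getD_eq_getElem _ _ (by omega : j + 1 < xs.length)]
  · rw [if_neg htl] at hlen
    have hc : j < t := by omega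
    rw [List.getD_eq_getElem _ _ h, List.getElem_eraseIdx, dif_pos hc, if_pos hc,
      List.getD_eq_getElem _ _ (by omega : j < xs.length)]

theorem pvU_A (prices scores : List Int) :
    (PySem.List.pyRange 0 (prices.length : Int) 1).map
        (fun i => PySem.List.pyGetD scores i 0 - PySem.List.pyGetD prices i 0)
      = pvU prices scores := by
  rw [PySem.List.pyRange_zero_natCast, List.map_map]
  unfold pvU
  apply List.map_congr_left
  intro k _
  simp [Function.comp, PySem.List.pyGetD_natCast]

theorem pvU_B (prices scores : List Int) (h : prices.length ≤ scores.length) :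
    (scores.zip prices).map (fun sp => sp.1 - sp.2) = pvU prices scores := by
  have hl : (scores.zip prices).length = prices.length := by
    simp [List.length_zip]; omega
  apply List.ext_getElem
  · simp [pvU, hl]
  · intro i h1 h2
    have hip : i < prices.length := by simpa [hl] using h1
    have his : i < scores.length := by omega
    simp [pvU, List.getElem_zip, hip, his]

theorem pvU_length (prices scores : List Int) : (pvU prices scores).length = prices.length := by
  simp [pvU]

theorem pvU_erase (prices scores : List Int) (t : Nat) (ht : t < prices.length)
    (hls : prices.length ≤ scores.length) :
    (PySem.List.pyRange 0 (((prices.eraseIdx t).length : Nat) : Int) 1).map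
        (fun i => -(PySem.List.pyGetD (prices.eraseIdx t) i 0)
          + PySem.List.pyGetD (scores.eraseIdx t) i 0)
      = (pvU prices scores).eraseIdx t := by
  have hlp : (prices.eraseIdx t).length = prices.length - 1 := by
    rw [List.length_eraseIdx, if_pos ht]
  have hls' : (scores.eraseIdx t).length = scores.length - 1 := by
    rw [List.length_eraseIdx, if_pos (by omega : t < scores.length)]
  rw [PySem.List.pyRange_zero_natCast, List.map_map]
  apply List.ext_getElem
  · simp [List.length_eraseIdx, pvU_length, hlp, ht]
  · intro i hi1 hi2
    have hi : i < prices.length - 1 := by simpa [hlp] using hi1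
    simp only [List.getElem_map, List.getElem_range, Function.comp_apply]
    rw [PySem.List.pyGetD_natCast, PySem.List.pyGetD_natCast,
      pvGetD_erase _ _ _ _ (by omega : i < (prices.eraseIdx t).length),
      pvGetD_erase _ _ _ _ (by omega : i < (scores.eraseIdx t).length),
      List.getElem_eraseIdx]
    by_cases hc : i < t
    · rw [dif_pos hc, if_pos hc]
      have hb : i < prices.length := by omega
      simp [pvU, hb]
      omega
    · rw [dif_neg hc, if_neg hc]
      have hb : i + 1 < prices.length := by omega
      simp [pvU, hb]
      omega

theorem pvFAX_of_A (u : List Int) (m : Int) (idx : Nat)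
    (hm : PySem.List.max? u (fun x => x) = some m)
    (hi : PySem.List.index? u m = some idx) :
    pvFAX u (fun _ => True) idx := by
  obtain ⟨hk, hval, hfst⟩ := PySem.List.getElem_of_index?_eq_some hi
  have hmax := PySem.List.max?_isMax hm
  refine ⟨hk, trivial, ?_, ?_⟩
  · intro k hklen _
    have h1 : u[k] ≤ m := hmax _ (List.getElem_mem hklen)
    rw [List.getD_eq_getElem _ _ hklen, List.getD_eq_getElem _ _ hk, hval]
    exact h1
  · intro k hkj _
    have hkl : k < u.length := lt_trans hkj hk
    have hle : u[k] ≤ m := hmax _ (List.getElem_mem hkl)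
    rw [List.getD_eq_getElem _ _ hkl, List.getD_eq_getElem _ _ hk, hval]
    exact lt_of_le_of_ne hle (hfst k hkj)

theorem pvMax?_range_of_fax (u : List Int) (j : Nat) (h : pvFAX u (fun _ => True) j) :
    PySem.List.max? (PySem.List.pyRange 0 (u.length : Int) 1)
      (fun i => PySem.List.pyGetD u i 0) = some (j : Int) := by
  obtain ⟨hj, -, hmax, hstr⟩ := h
  have hsplit : PySem.List.pyRange 0 (u.length : Int) 1
      = PySem.List.pyRange 0 (j : Int) 1
        ++ (j : Int) :: PySem.List.pyRange ((j : Int) + 1) (u.length : Int) 1 := by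
    rw [PySem.List.pyRange_one_append 0 (j : Int) (u.length : Int)
      (by exact_mod_cast Nat.zero_le j) (by exact_mod_cast Nat.le_of_lt hj)]
    congr 1
    exact PySem.List.pyRange_one_cons (by exact_mod_cast hj)
  rw [hsplit]
  apply pvMax?_of_decomp
  · intro y hy
    obtain ⟨hy0, hyj⟩ := PySem.List.mem_pyRange_one.mp hy
    obtain ⟨k, rfl⟩ : ∃ k : Nat, y = (k : Int) := ⟨y.toNat, (Int.toNat_of_nonneg hy0).symm⟩
    simp only [PySem.List.pyGetD_natCast]
    exact hstr k (by exact_mod_cast hyj) trivial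
  · intro y hy
    obtain ⟨hy0, hyl⟩ := PySem.List.mem_pyRange_one.mp hy
    obtain ⟨k, rfl⟩ : ∃ k : Nat, y = (k : Int) := ⟨y.toNat, (Int.toNat_of_nonneg (by omega)).symm⟩
    simp only [PySem.List.pyGetD_natCast]
    exact hmax k (by exact_mod_cast hyl) trivial

theorem pvMax?_filter_of_fax (u : List Int) (b j : Nat) (_hb : b < u.length)
    (h : pvFAX u (fun k => k ≠ b) j) :
    PySem.List.max? ((PySem.List.pyRange 0 (u.length : Int) 1).filter (fun i => i != (b : Int)))
      (fun i => PySem.List.pyGetD u i 0) = some (j : Int) := by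
  obtain ⟨hj, hjb, hmax, hstr⟩ := h
  have hsplit : PySem.List.pyRange 0 (u.length : Int) 1
      = PySem.List.pyRange 0 (j : Int) 1
        ++ (j : Int) :: PySem.List.pyRange ((j : Int) + 1) (u.length : Int) 1 := by
    rw [PySem.List.pyRange_one_append 0 (j : Int) (u.length : Int)
      (by exact_mod_cast Nat.zero_le j) (by exact_mod_cast Nat.le_of_lt hj)]
    congr 1
    exact PySem.List.pyRange_one_cons (by exact_mod_cast hj)
  have hjb' : ((j : Int) != (b : Int)) = true := by
    simp only [bne_iff_ne, ne_eq, Int.natCast_inj]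
    exact hjb
  rw [hsplit, List.filter_append, List.filter_cons, if_pos hjb']
  apply pvMax?_of_decomp
  · intro y hy
    obtain ⟨hy', hyb⟩ := List.mem_filter.mp hy
    obtain ⟨hy0, hyj⟩ := PySem.List.mem_pyRange_one.mp hy'
    obtain ⟨k, rfl⟩ : ∃ k : Nat, y = (k : Int) := ⟨y.toNat, (Int.toNat_of_nonneg hy0).symm⟩
    simp only [PySem.List.pyGetD_natCast]
    exact hstr k (by exact_mod_cast hyj) (by simpa using hyb)
  · intro y hy
    obtain ⟨hy', hyb⟩ := List.mem_filter.mp hy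
    obtain ⟨hy0, hyl⟩ := PySem.List.mem_pyRange_one.mp hy'
    obtain ⟨k, rfl⟩ : ∃ k : Nat, y = (k : Int) := ⟨y.toNat, (Int.toNat_of_nonneg (by omega)).symm⟩
    simp only [PySem.List.pyGetD_natCast]
    exact hmax k (by exact_mod_cast hyl) (by simpa using hyb)

theorem pvFAX_lift (u : List Int) (t : Nat) (ht : t < u.length) (j : Nat)
    (h : pvFAX (u.eraseIdx t) (fun _ => True) j) :
    pvFAX u (fun k => k ≠ t) (if j < t then j else j + 1) := by
  obtain ⟨hj, -, hmax, hstr⟩ := h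
  have hlen : (u.eraseIdx t).length = u.length - 1 := by
    rw [List.length_eraseIdx, if_pos ht]
  have hvL : (u.eraseIdx t).getD j 0 = u.getD (if j < t then j else j + 1) 0 :=
    pvGetD_erase u t j 0 hj
  refine ⟨by split <;> omega, by split <;> omega, ?_, ?_⟩
  · intro k hk hkt
    by_cases hkc : k < t
    · have hk' : k < (u.eraseIdx t).length := by omega
      have he : (u.eraseIdx t).getD k 0 = u.getD k 0 := by
        rw [pvGetD_erase u t k 0 hk', if_pos hkc]
      rw [← he, ← hvL]
      exact hmax k hk' trivial
    · have hk' : k - 1 < (u.eraseIdx t).length := by omega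
      have he : (u.eraseIdx t).getD (k - 1) 0 = u.getD k 0 := by
        rw [pvGetD_erase u t (k - 1) 0 hk', if_neg (by omega)]
        congr 1
        omega
      rw [← he, ← hvL]
      exact hmax (k - 1) hk' trivial
  · intro k hkL hkt
    by_cases hkc : k < t
    · have hk' : k < (u.eraseIdx t).length := by omega
      have he : (u.eraseIdx t).getD k 0 = u.getD k 0 := by
        rw [pvGetD_erase u t k 0 hk', if_pos hkc]
      rw [← he, ← hvL]
      refine hstr k ?_ trivial
      split at hkL <;> omega
    · have hk' : k - 1 < (u.eraseIdx t).length := by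
        split at hkL <;> omega
      have he : (u.eraseIdx t).getD (k - 1) 0 = u.getD k 0 := by
        rw [pvGetD_erase u t (k - 1) 0 hk', if_neg (by omega)]
        congr 1
        omega
      rw [← he, ← hvL]
      refine hstr (k - 1) ?_ trivial
      split at hkL <;> omega

-- ===== VERDICT (by name: the statement is the Claim_ definition above) =====
theorem loo_payments_spec : Claim_equal_loo_payments := by
  intro prices scores doc_ids _ hPre
  obtain ⟨h1, h2, h3, h4⟩ := hPre
  unfold Spec_loo_payments
  have hUA := pvU_A prices scores
  have hUB := pvU_B prices scores h2
  have hulen := pvU_length prices scores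
  have hune : pvU prices scores ≠ [] := by
    intro hnil
    rw [hnil] at hulen
    simp at hulen
    omega
  obtain ⟨m, hm⟩ : ∃ m, PySem.List.max? (pvU prices scores) (fun x => x) = some m := by
    cases hc : PySem.List.max? (pvU prices scores) (fun x => x) with
    | none => exact absurd ((PySem.List.max?_eq_none_iff _ _).mp hc) hune
    | some m => exact ⟨m, rfl⟩
  obtain ⟨idx, hidx⟩ : ∃ idx, PySem.List.index? (pvU prices scores) m = some idx :=
    Option.isSome_iff_exists.mp ((PySem.List.index?_isSome_iff _ m).mpr (PySem.List.max?_mem hm))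
  have hfax := pvFAX_of_A _ m idx hm hidx
  have hbest := pvMax?_range_of_fax _ idx hfax
  simp only [loo_payments, loo_payments_alt, hUA, hUB, hm, hidx, hbest]
  congr 1
  apply PySem.List.foldl_congr_mem
  intro pay j hjmem
  obtain ⟨hj0, hjlt⟩ := PySem.List.mem_pyRange_one.mp hjmem
  obtain ⟨t, rfl⟩ : ∃ t : Nat, j = (t : Int) := ⟨j.toNat, (Int.toNat_of_nonneg hj0).symm⟩
  have htd : t < doc_ids.length := by exact_mod_cast hjlt
  have hdne : doc_ids ≠ [] := by
    intro hnil
    rw [hnil] at htd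
    simp at htd
  have hn2 : 2 ≤ prices.length := h4 hdne
  have htp : t < prices.length := lt_of_lt_of_le htd h3
  have hts : t < scores.length := by omega
  simp only [PySem.List.pop?_natCast prices t htp, PySem.List.pop?_natCast scores t hts]
  rw [pvU_erase prices scores t htp h2]
  have hu'len : ((pvU prices scores).eraseIdx t).length = prices.length - 1 := by
    rw [List.length_eraseIdx, if_pos (by omega : t < (pvU prices scores).length)]
    omega
  have hu'ne : (pvU prices scores).eraseIdx t ≠ [] := by
    intro hnil
    rw [hnil] at hu'len
    simp at hu'len
    omega
  obtain ⟨m2, hm2⟩ : ∃ m2, PySem.List.max? ((pvU prices scores).eraseIdx t) (fun x => x) = some m2 := by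
    cases hc : PySem.List.max? ((pvU prices scores).eraseIdx t) (fun x => x) with
    | none => exact absurd ((PySem.List.max?_eq_none_iff _ _).mp hc) hu'ne
    | some m2 => exact ⟨m2, rfl⟩
  obtain ⟨id2, hid2⟩ : ∃ id2, PySem.List.index? ((pvU prices scores).eraseIdx t) m2 = some id2 :=
    Option.isSome_iff_exists.mp ((PySem.List.index?_isSome_iff _ m2).mpr (PySem.List.max?_mem hm2))
  simp only [hm2, hid2]
  have hfax2 := pvFAX_of_A _ m2 id2 hm2 hid2
  have hid2lt : id2 < ((pvU prices scores).eraseIdx t).length := hfax2.1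
  have hlift := pvFAX_lift (pvU prices scores) t (by omega) id2 hfax2
  have hscoreb : id2 < (scores.eraseIdx t).length := by
    rw [List.length_eraseIdx, if_pos hts]
    omega
  by_cases hti : t = idx
  · subst hti
    have hrest := pvMax?_filter_of_fax (pvU prices scores) t
      (if id2 < t then id2 else id2 + 1) (by omega) hlift
    have hLlt : (if id2 < t then id2 else id2 + 1) < (pvU prices scores).length := hlift.1
    have hLne : (if id2 < t then id2 else id2 + 1) ≠ t := hlift.2.1
    have hrne : List.filter (fun i => i != (t : Int))
        (PySem.List.pyRange 0 ((pvU prices scores).length : Int) 1) ≠ [] := by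
      intro hnil
      have hmem : ((if id2 < t then id2 else id2 + 1 : Nat) : Int) ∈
          List.filter (fun i => i != (t : Int))
            (PySem.List.pyRange 0 ((pvU prices scores).length : Int) 1) := by
        refine List.mem_filter.mpr ⟨PySem.List.mem_pyRange_one.mpr ⟨by positivity, by exact_mod_cast hLlt⟩, ?_⟩
        simp only [bne_iff_ne, ne_eq, Int.natCast_inj]
        exact hLne
      rw [hnil] at hmem
      simp at hmem
    rw [if_pos rfl, if_neg hrne, hrest]
    rw [PySem.List.pyGetD_natCast (scores.eraseIdx t) id2,
      pvGetD_erase scores t id2 0 hscoreb, PySem.List.pyGetD_natCast scores]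
    by_cases hcc : id2 < t
    · simp [hcc]
    · simp only [if_neg hcc, PySem.List.pyGetD_natCast]
  · rw [if_neg (by exact_mod_cast hti : ¬ ((t : Int) = (idx : Int)))]
    have hfaxExcl : pvFAX (pvU prices scores) (fun k => k ≠ t) idx := by
      obtain ⟨hi1, -, hi3, hi4⟩ := hfax
      exact ⟨hi1, fun h => hti h.symm, fun k hk _ => hi3 k hk trivial,
        fun k hk _ => hi4 k hk trivial⟩
    have hL : (if id2 < t then id2 else id2 + 1) = idx := pvFAX_unique hlift hfaxExcl
    rw [PySem.List.pyGetD_natCast (scores.eraseIdx t) id2,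
      pvGetD_erase scores t id2 0 hscoreb, hL, PySem.List.pyGetD_natCast scores]
    simp
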